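-- pv_equiv track=rewrite | github.com/queelius/computational-explorations | src/coprime_ramsey_variants.py | find_coprime_cliques
-- ===== SOURCE A (Python) =====
-- import math
-- from typing import List, Tuple, Dict, Set, Optional
--
-- def coprime_adj(n: int) -> Dict[int, Set[int]]:
--     """Build adjacency dict for the coprime graph on [n]."""
--     adj: Dict[int, Set[int]] = {v: set() for v in range(1, n + 1)}
--     for i in range(1, n + 1):
--         for j in range(i + 1, n + 1):
--             if math.gcd(i, j) == 1:
--                 adj[i].add(j)
--                 adj[j].add(i)
--     return adj
--
-- def find_coprime_cliques(n: int, k: int) -> List[Tuple[int, ...]]: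
--     """Enumerate all k-cliques in the coprime graph on [n]."""
--     if k < 1:
--         return []
--     if k == 1:
--         return [(v,) for v in range(1, n + 1)]
--
--     adj = coprime_adj(n)
--     vertices = list(range(1, n + 1))
--     cliques: List[Tuple[int, ...]] = []
--
--     def extend(current: List[int], candidates: List[int]):
--         if len(current) == k:
--             cliques.append(tuple(current))
--             return
--         needed = k - len(current)
--         for idx, v in enumerate(candidates):
--             if len(candidates) - idx < needed:
--                 break
--             if all(v in adj[u] for u in current):
--                 new_cands = [w for w in candidates[idx + 1:] if w in adj[v]]
--                 extend(current + [v], new_cands)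
--
--     extend([], vertices)
--     return cliques
-- ===== SOURCE B (Python) =====
-- import math
--
-- def find_coprime_cliques(n, k):
--     """Enumerate all k-cliques of the coprime graph on [n], level by level."""
--     if k < 1:
--         return []
--     gcd = math.gcd
--     level = [((), list(range(1, n + 1)))]   # (clique, usable candidates above it)
--     for _ in range(k):
--         if not level:
--             break
--         nxt = []
--         for c, cand in level:
--             need = k - len(c) - 1
--             for v in cand:
--                 rem = [w for w in cand if v < w and gcd(v, w) == 1]
--                 if len(rem) >= need:
--                     nxt.append((c + (v,), rem))
--         level = nxt
--     return [c for c, _ in level]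
-- ===== Notes on version B (the rewrite author's own statement) =====
-- stated objective: alternative
-- what changed: Replaces the precomputed adjacency dict of sets and the recursive enumerate/break backtracker with an iterative level-wise (breadth-first) loop over (clique, remaining-candidates) pairs that tests coprimality by gcd directly and keeps a child only when enough candidates remain for it to reach size k.
import Mathlib
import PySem

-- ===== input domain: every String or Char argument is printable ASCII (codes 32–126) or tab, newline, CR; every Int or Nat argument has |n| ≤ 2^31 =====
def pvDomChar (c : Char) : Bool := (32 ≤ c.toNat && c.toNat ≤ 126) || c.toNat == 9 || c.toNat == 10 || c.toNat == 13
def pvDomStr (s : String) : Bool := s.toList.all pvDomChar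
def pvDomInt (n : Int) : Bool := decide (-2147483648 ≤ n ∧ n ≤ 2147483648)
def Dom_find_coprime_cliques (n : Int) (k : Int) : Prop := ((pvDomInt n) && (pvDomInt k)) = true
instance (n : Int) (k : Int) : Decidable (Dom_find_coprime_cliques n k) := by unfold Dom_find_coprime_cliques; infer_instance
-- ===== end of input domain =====

-- B replaces A's adjacency-dict-of-sets + recursive backtracking by an iterative
-- level-wise (breadth-first) construction over (clique, remaining-candidates) pairs,
-- pruning tuples that cannot reach size k; objective: alternative (no speed claim).

-- ===== PORT A =====
-- Python: coprime_adj(n); adj[i].add(j) is Dict.modify at a key that is always present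
-- (every vertex was inserted first), so the `modify` default ∅ is never used.
def coprime_adj (n : Int) : PySem.Dict Int (PySem.Set Int) :=
  (PySem.List.pyRange 1 (n + 1) 1).foldl (fun d i =>
      (PySem.List.pyRange (i + 1) (n + 1) 1).foldl (fun d j =>
        if Int.gcd i j = 1 then
          (d.modify i PySem.Set.empty (fun s => PySem.Set.add s j)).modify j PySem.Set.empty
            (fun s => PySem.Set.add s i)
        else d) d)
    ((PySem.List.pyRange 1 (n + 1) 1).foldl (fun d v => d.insert v PySem.Set.empty)
      PySem.Dict.empty)

-- Python: `v in adj[u]`; a KeyError is impossible (u is always a vertex of the graph),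
-- so `getD` with default ∅ is exact on every reachable lookup.
def adjMem (adj : PySem.Dict Int (PySem.Set Int)) (u v : Int) : Bool :=
  PySem.Set.contains (adj.getD u PySem.Set.empty) v

-- Python: the inner `extend(current, candidates)` backtracker.  The `for idx, v in
-- enumerate(candidates)` loop with its `break` (when len(candidates)-idx < needed) and
-- its recursion becomes structural recursion ('cands' is the not-yet-scanned suffix,
-- so len(candidates)-idx is its length).
def extendA (adj : PySem.Dict Int (PySem.Set Int)) (k : Int) : List Int → List Int → List (List Int)
  | cur, [] => if (cur.length : Int) = k then [cur] else []
  | cur, v :: rest =>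
    if (cur.length : Int) = k then [cur]
    else if ((v :: rest).length : Int) < k - (cur.length : Int) then []
    else
      (if cur.all (fun u => adjMem adj u v) then
          extendA adj k (cur ++ [v]) (rest.filter (fun w => adjMem adj v w))
        else []) ++ extendA adj k cur rest
termination_by _ cands => cands.length
decreasing_by
  · simp only [List.length_cons, List.length_unattach]
    exact Nat.lt_succ_of_le (le_trans (List.length_filter_le _ _) (by simp))
  · simp only [List.length_cons]
    exact Nat.lt_succ_self _

def find_coprime_cliques (n : Int) (k : Int) : List (List Int) :=
  if k < 1 then []
  else if k = 1 then (PySem.List.pyRange 1 (n + 1) 1).map (fun v => [v])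
  else extendA (coprime_adj n) k [] (PySem.List.pyRange 1 (n + 1) 1)

-- ===== PORT B =====
-- Python: the level body
--   for c, cand in level:
--       need = k - len(c) - 1
--       for v in cand:
--           rem = [w for w in cand if v < w and gcd(v, w) == 1]
--           if len(rem) >= need: nxt.append((c + (v,), rem))
-- as flatMap over the level of flatMap over cand of a conditional singleton.
def stepB (k : Int) (level : List (List Int × List Int)) : List (List Int × List Int) :=
  level.flatMap (fun p =>
    p.2.flatMap (fun v =>
      let rem := p.2.filter (fun w => decide (v < w) && decide (Int.gcd v w = 1))
      if (rem.length : Int) ≥ k - (p.1.length : Int) - 1 then [(p.1 ++ [v], rem)] else []))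

-- Python: `for _ in range(k): if not level: break; level = nxt`
def loopB (k : Int) : Nat → List (List Int × List Int) → List (List Int × List Int)
  | 0, level => level
  | t + 1, level => if level = [] then [] else loopB k t (stepB k level)

def find_coprime_cliques_alt (n : Int) (k : Int) : List (List Int) :=
  if k < 1 then []
  else (loopB k k.toNat [(([] : List Int), PySem.List.pyRange 1 (n + 1) 1)]).map (fun p => p.1)

-- ===== PRECONDITION & SPEC =====
def Spec_find_coprime_cliques (n : Int) (k : Int) (out : List (List Int)) : Prop := out = find_coprime_cliques_alt n k
instance (n : Int) (k : Int) (out : List (List Int)) : Decidable (Spec_find_coprime_cliques n k out) := by unfold Spec_find_coprime_cliques; infer_instance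

-- ===== CLAIM (what is proved, stated in full; the proofs are below) =====
def Claim_equal_find_coprime_cliques : Prop := ∀ (n : Int) (k : Int), Dom_find_coprime_cliques n k → Spec_find_coprime_cliques n k (find_coprime_cliques n k)

-- ===== LEMMAS AND PROOFS =====

-- pairwise-coprime test, the common specification predicate of both programs
def pwB (c : List Int) : Bool := decide (c.Pairwise fun a b => Int.gcd a b = 1)

lemma bool_ext {a b : Bool} (h : a = true ↔ b = true) : a = b := by
  cases a <;> cases b <;> simp_all

lemma all_and (l : List Int) (p q : Int → Bool) :
    l.all (fun x => p x && q x) = (l.all p && l.all q) := by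
  apply bool_ext
  simp only [List.all_eq_true, Bool.and_eq_true]
  exact ⟨fun h => ⟨fun x hx => (h x hx).1, fun x hx => (h x hx).2⟩,
    fun h x hx => ⟨h.1 x hx, h.2 x hx⟩⟩

lemma flatMap_map_comp {α β γ : Type} (f : α → β) (g : β → List γ) (l : List α) :
    (l.map f).flatMap g = l.flatMap (fun x => g (f x)) := by
  induction l with
  | nil => rfl
  | cons x xs ih => simp only [List.map_cons, List.flatMap_cons, ih]

lemma flatMap_congr_mem {α β : Type} (l : List α) (f g : α → List β)
    (h : ∀ x ∈ l, f x = g x) : l.flatMap f = l.flatMap g := by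
  induction l with
  | nil => rfl
  | cons x xs ih =>
    simp only [List.flatMap_cons]
    rw [h x (List.mem_cons_self ..), ih (fun y hy => h y (List.mem_cons_of_mem _ hy))]

lemma pwB_nil : pwB [] = true := by simp [pwB]

lemma pwB_singleton (v : Int) : pwB [v] = true := by simp [pwB]

lemma pwB_cons (v : Int) (c : List Int) :
    pwB (v :: c) = (c.all (fun w => decide (Int.gcd v w = 1)) && pwB c) := by
  apply bool_ext
  simp [pwB, List.pairwise_cons, List.all_eq_true]

-- filtering the ground list commutes with taking combinations (same lexicographic order)
lemma comb_filter (q : Int → Bool) : ∀ (xs : List Int) (r : Nat),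
    PySem.List.combinations (xs.filter q) r
      = (PySem.List.combinations xs r).filter (fun c => c.all q) := by
  intro xs
  induction xs with
  | nil =>
    intro r
    cases r with
    | zero => simp [PySem.List.combinations_zero]
    | succ m => simp [PySem.List.combinations_nil_succ]
  | cons x xs ih =>
    intro r
    cases r with
    | zero => simp [PySem.List.combinations_zero]
    | succ m =>
      by_cases hx : q x
      · rw [List.filter_cons_of_pos hx, PySem.List.combinations_cons_succ,
          PySem.List.combinations_cons_succ, ih m, ih (m + 1), List.filter_append,
          List.filter_map]
        congr 1
        exact congrArg _ (List.filter_congr (fun c _ => by simp [hx]))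
      · rw [List.filter_cons_of_neg (by simp [hx]), PySem.List.combinations_cons_succ,
          List.filter_append, List.filter_map, ih (m + 1)]
        have hnil : (List.filter ((fun c => c.all q) ∘ (fun c => x :: c))
            (PySem.List.combinations xs m)) = [] := by
          apply List.filter_eq_nil_iff.mpr
          intro c _
          simp [hx]
        rw [hnil]
        simp

-- ===== adjacency-dict characterization =====

lemma initD (vs : List Int) (u : Int) (d : PySem.Dict Int (PySem.Set Int))
    (h : d.getD u PySem.Set.empty = PySem.Set.empty) :
    ((vs.foldl (fun d v => d.insert v PySem.Set.empty) d).getD u PySem.Set.empty)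
      = PySem.Set.empty := by
  induction vs generalizing d with
  | nil => exact h
  | cons x xs ih =>
    apply ih
    rw [PySem.Dict.getD_insert]
    split
    · rfl
    · exact h

lemma innerMem (i : Int) (js : List Int) (u v : Int) (d : PySem.Dict Int (PySem.Set Int)) :
    v ∈ (js.foldl (fun d j =>
        if Int.gcd i j = 1 then
          (d.modify i PySem.Set.empty (fun s => PySem.Set.add s j)).modify j PySem.Set.empty
            (fun s => PySem.Set.add s i)
        else d) d).getD u PySem.Set.empty
    ↔ v ∈ d.getD u PySem.Set.empty
      ∨ ∃ j ∈ js, Int.gcd i j = 1 ∧ ((u = i ∧ v = j) ∨ (u = j ∧ v = i)) := by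
  induction js generalizing d with
  | nil => simp
  | cons j js ih =>
    simp only [List.foldl_cons, ih, List.mem_cons]
    by_cases hg : Int.gcd i j = 1
    · rw [if_pos hg]
      simp only [PySem.Dict.getD_modify]
      by_cases huj : u = j <;> by_cases hui : u = i <;> by_cases hji : j = i <;>
        simp_all [PySem.Set.mem_add] <;> aesop
    · rw [if_neg hg]
      constructor
      · rintro (h | ⟨j', hj', hc⟩)
        · exact Or.inl h
        · exact Or.inr ⟨j', Or.inr hj', hc⟩
      · rintro (h | ⟨j', hj'c, hc⟩)
        · exact Or.inl h
        · rcases hj'c with rfl | hj'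
          · exact absurd hc.1 hg
          · exact Or.inr ⟨j', hj', hc⟩

lemma outerMem (n : Int) (is : List Int) (u v : Int) (d : PySem.Dict Int (PySem.Set Int)) :
    v ∈ (is.foldl (fun d i =>
        (PySem.List.pyRange (i + 1) (n + 1) 1).foldl (fun d j =>
          if Int.gcd i j = 1 then
            (d.modify i PySem.Set.empty (fun s => PySem.Set.add s j)).modify j PySem.Set.empty
              (fun s => PySem.Set.add s i)
          else d) d) d).getD u PySem.Set.empty
    ↔ v ∈ d.getD u PySem.Set.empty
      ∨ ∃ i ∈ is, ∃ j ∈ PySem.List.pyRange (i + 1) (n + 1) 1,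
          Int.gcd i j = 1 ∧ ((u = i ∧ v = j) ∨ (u = j ∧ v = i)) := by
  induction is generalizing d with
  | nil => simp
  | cons i is ih =>
    simp only [List.foldl_cons, ih, innerMem, List.mem_cons]
    constructor
    · rintro ((h | h) | h)
      · exact Or.inl h
      · exact Or.inr ⟨i, Or.inl rfl, h⟩
      · rcases h with ⟨i', hi', hrest⟩
        exact Or.inr ⟨i', Or.inr hi', hrest⟩
    · rintro (h | ⟨i', hi', hrest⟩)
      · exact Or.inl (Or.inl h)
      · rcases hi' with rfl | hi'
        · exact Or.inl (Or.inr hrest)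
        · exact Or.inr ⟨i', hi', hrest⟩

lemma adjMem_iff (n u v : Int) (hu1 : 1 ≤ u) (hun : u ≤ n) :
    adjMem (coprime_adj n) u v = true ↔ (1 ≤ v ∧ v ≤ n ∧ v ≠ u ∧ Int.gcd u v = 1) := by
  unfold adjMem coprime_adj
  rw [PySem.Set.contains_iff, outerMem,
    initD _ u _ (by rw [PySem.Dict.getD_empty])]
  constructor
  · rintro (h | ⟨i, hi, j, hj, hg, hc⟩)
    · simp [PySem.Set.empty] at h
    · rw [PySem.List.mem_pyRange_one] at hi hj
      rcases hc with ⟨rfl, rfl⟩ | ⟨rfl, rfl⟩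
      · exact ⟨by omega, by omega, by omega, hg⟩
      · exact ⟨by omega, by omega, by omega, by rw [Int.gcd_comm]; exact hg⟩
  · rintro ⟨hv1, hvn, hne, hg⟩
    right
    rcases lt_or_gt_of_ne (fun h => hne h.symm) with hlt | hlt
    · exact ⟨u, by rw [PySem.List.mem_pyRange_one]; omega,
        v, by rw [PySem.List.mem_pyRange_one]; omega, hg, Or.inl ⟨rfl, rfl⟩⟩
    · exact ⟨v, by rw [PySem.List.mem_pyRange_one]; omega,
        u, by rw [PySem.List.mem_pyRange_one]; omega, by rw [Int.gcd_comm]; exact hg,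
        Or.inr ⟨rfl, rfl⟩⟩

-- ===== A: the backtracker emits exactly the pairwise-coprime combinations =====

lemma extendA_nil (n k : Int) (cur : List Int) (hk : (cur.length : Int) ≤ k) :
    extendA (coprime_adj n) k cur []
      = ((PySem.List.combinations ([] : List Int) (k - cur.length).toNat).filter pwB).map
          (fun c => cur ++ c) := by
  by_cases hkeq : (cur.length : Int) = k
  · have h0 : (k - (cur.length : Int)).toNat = 0 := by omega
    rw [extendA, if_pos hkeq, h0, PySem.List.combinations_zero]
    simp [pwB_nil]
  · obtain ⟨m, hm⟩ : ∃ m : Nat, (k - (cur.length : Int)).toNat = m + 1 :=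
      ⟨(k - cur.length - 1).toNat, by omega⟩
    rw [extendA, if_neg hkeq, hm, PySem.List.combinations_nil_succ]
    simp

lemma extendA_eq (n k : Int) : ∀ (N : Nat) (cands cur : List Int), cands.length ≤ N →
    (cur.length : Int) ≤ k →
    cands.Pairwise (· < ·) →
    (∀ w ∈ cands, 1 ≤ w ∧ w ≤ n) →
    (∀ u ∈ cur, 1 ≤ u ∧ u ≤ n) →
    (∀ u ∈ cur, ∀ w ∈ cands, u ≠ w ∧ Int.gcd u w = 1) →
    extendA (coprime_adj n) k cur cands
      = ((PySem.List.combinations cands (k - cur.length).toNat).filter pwB).map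
          (fun c => cur ++ c) := by
  intro N
  induction N with
  | zero =>
    intro cands cur hlen hk _ _ _ _
    cases cands with
    | nil => exact extendA_nil n k cur hk
    | cons v rest => simp at hlen
  | succ N ih =>
    intro cands cur hlen hk hsort hbnd hcur hpair
    cases cands with
    | nil => exact extendA_nil n k cur hk
    | cons v rest =>
      by_cases hkeq : (cur.length : Int) = k
      · have h0 : (k - (cur.length : Int)).toNat = 0 := by omega
        rw [extendA, if_pos hkeq, h0, PySem.List.combinations_zero]
        simp [pwB_nil]
      · have hltk : (cur.length : Int) < k := lt_of_le_of_ne hk hkeq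
        obtain ⟨m, hm⟩ : ∃ m : Nat, (k - (cur.length : Int)).toNat = m + 1 :=
          ⟨(k - cur.length - 1).toNat, by omega⟩
        by_cases hbrk : ((v :: rest).length : Int) < k - (cur.length : Int)
        · have hlt' : (v :: rest).length < m + 1 := by omega
          rw [extendA, if_neg hkeq, if_pos hbrk, hm,
            PySem.List.combinations_eq_nil_of_length_lt _ hlt']
          simp
        · have hv := hbnd v (List.mem_cons_self ..)
          -- the adjacency test over `cur` always succeeds
          have hall : cur.all (fun u => adjMem (coprime_adj n) u v) = true := by
            rw [List.all_eq_true]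
            intro u hu
            obtain ⟨hu1, hun⟩ := hcur u hu
            obtain ⟨hne, hg⟩ := hpair u hu v (List.mem_cons_self ..)
            exact (adjMem_iff n u v hu1 hun).mpr ⟨hv.1, hv.2, fun h => hne h.symm, hg⟩
          -- the candidate filter is the plain coprimality filter
          have hfilt : rest.filter (fun w => adjMem (coprime_adj n) v w)
              = rest.filter (fun w => decide (Int.gcd v w = 1)) := by
            apply List.filter_congr
            intro w hw
            have hwb := hbnd w (List.mem_cons_of_mem _ hw)
            have hvw : v < w := (List.pairwise_cons.mp hsort).1 w hw
            apply bool_ext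
            rw [adjMem_iff n v w hv.1 hv.2, decide_eq_true_eq]
            constructor
            · rintro ⟨_, _, _, hg⟩; exact hg
            · intro hg; exact ⟨hwb.1, hwb.2, by omega, hg⟩
          rw [extendA, if_neg hkeq, if_neg hbrk, if_pos hall, hfilt, hm,
            PySem.List.combinations_cons_succ, List.filter_append, List.map_append]
          congr 1
          · -- v is chosen
            have hsub : (rest.filter (fun w => decide (Int.gcd v w = 1))).Sublist rest :=
              List.filter_sublist
            have hsort' := List.Pairwise.sublist hsub (List.pairwise_cons.mp hsort).2
            have hlen1 : (rest.filter (fun w => decide (Int.gcd v w = 1))).length ≤ N := by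
              have h1 := hsub.length_le
              simp only [List.length_cons] at hlen
              omega
            have hbnd' : ∀ w ∈ rest.filter (fun w => decide (Int.gcd v w = 1)),
                1 ≤ w ∧ w ≤ n :=
              fun w hw => hbnd w (List.mem_cons_of_mem _ (List.mem_of_mem_filter hw))
            have hcur' : ∀ u ∈ cur ++ [v], 1 ≤ u ∧ u ≤ n := by
              intro u hu
              rcases List.mem_append.mp hu with h | h
              · exact hcur u h
              · rw [List.mem_singleton] at h; subst h; exact hv
            have hpair' : ∀ u ∈ cur ++ [v],
                ∀ w ∈ rest.filter (fun w => decide (Int.gcd v w = 1)),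
                u ≠ w ∧ Int.gcd u w = 1 := by
              intro u hu w hw
              have hwrest := List.mem_of_mem_filter hw
              have hgf : Int.gcd v w = 1 := by simpa using List.of_mem_filter hw
              rcases List.mem_append.mp hu with h | h
              · exact hpair u h w (List.mem_cons_of_mem _ hwrest)
              · rw [List.mem_singleton] at h
                have hvw : v < w := (List.pairwise_cons.mp hsort).1 w hwrest
                exact ⟨by omega, by rw [h]; exact hgf⟩
            have harith : (k - (((cur ++ [v]).length : Nat) : Int)).toNat = m := by
              simp only [List.length_append, List.length_cons, List.length_nil]
              push_cast
              omega
            rw [ih _ (cur ++ [v]) hlen1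
                (by simp only [List.length_append, List.length_cons, List.length_nil]
                    push_cast; omega)
                hsort' hbnd' hcur' hpair', harith,
              comb_filter, List.filter_filter, List.filter_map, List.map_map]
            rw [List.filter_congr (fun c (_ : c ∈ PySem.List.combinations rest m) => by
              show (pwB c && c.all fun w => decide (Int.gcd v w = 1))
                  = ((pwB ∘ fun c => v :: c) c)
              rw [Function.comp_apply, pwB_cons, Bool.and_comm])]
            apply List.map_congr_left
            intro c _
            show (cur ++ [v]) ++ c = cur ++ v :: c
            simp
          · -- v is skipped
            have hlen2 : rest.length ≤ N := by
              simp only [List.length_cons] at hlen; omega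
            rw [ih rest cur hlen2 hk (List.pairwise_cons.mp hsort).2
              (fun w hw => hbnd w (List.mem_cons_of_mem _ hw)) hcur
              (fun u hu w hw => hpair u hu w (List.mem_cons_of_mem _ hw)), hm]

lemma a_char (n k : Int) (hk : 1 ≤ k) :
    find_coprime_cliques n k
      = (PySem.List.combinations (PySem.List.pyRange 1 (n + 1) 1) k.toNat).filter pwB := by
  unfold find_coprime_cliques
  rw [if_neg (by omega)]
  by_cases hk1 : k = 1
  · subst hk1
    rw [if_pos rfl]
    have h1 : (1 : Int).toNat = 1 := rfl
    rw [h1, PySem.List.combinations_one, List.filter_map]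
    have hself : (PySem.List.pyRange 1 (n + 1) 1).filter (pwB ∘ fun v => [v])
        = PySem.List.pyRange 1 (n + 1) 1 :=
      List.filter_eq_self.mpr (fun v _ => by simp [pwB_singleton])
    rw [hself]
  · rw [if_neg hk1]
    rw [extendA_eq n k (PySem.List.pyRange 1 (n + 1) 1).length _ [] le_rfl
      (by simp only [List.length_nil]; omega)
      (PySem.List.pairwise_lt_pyRange_one 1 (n + 1))
      (fun w hw => by rw [PySem.List.mem_pyRange_one] at hw; omega)
      (by simp)
      (by simp)]
    simp

-- ===== B: level-wise growth preserves the same characterization =====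

lemma pyGetD_neg_one_singleton (x : Int) : PySem.List.pyGetD [x] (-1) 0 = x := by
  simp [PySem.List.pyGetD, PySem.List.pyGet?, PySem.List.pyIdx?]

lemma pyGetD_neg_one_cons (x : Int) (c : List Int) (h : c ≠ []) :
    PySem.List.pyGetD (x :: c) (-1) 0 = PySem.List.pyGetD c (-1) 0 := by
  cases c with
  | nil => exact absurd rfl h
  | cons y ys =>
    simp [PySem.List.pyGetD, PySem.List.pyGet?, PySem.List.pyIdx?]
    rfl

-- the pruned-DFS extension list, with an explicit lower bound `a` for the empty
-- clique and an element predicate q (proof-only device)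
def extBax (n a : Int) (q : Int → Bool) (c : List Int) : List (List Int) :=
  ((PySem.List.pyRange (if c = [] then a else PySem.List.pyGetD c (-1) 0 + 1) (n + 1) 1).filter
      (fun v => q v && c.all (fun u => decide (Int.gcd u v = 1)))).map (fun v => c ++ [v])

lemma extBax_cons (n a : Int) (q : Int → Bool) (c : List Int) :
    extBax n a q (a :: c)
      = (extBax n (a + 1) (fun v => q v && decide (Int.gcd a v = 1)) c).map (a :: ·) := by
  unfold extBax
  rw [List.map_map]
  have hstart : (if (a :: c) = [] then a else PySem.List.pyGetD (a :: c) (-1) 0 + 1)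
      = (if c = [] then a + 1 else PySem.List.pyGetD c (-1) 0 + 1) := by
    cases c with
    | nil => simp [pyGetD_neg_one_singleton]
    | cons y ys => simp [pyGetD_neg_one_cons a (y :: ys) (List.cons_ne_nil y ys)]
  rw [hstart]
  rw [List.filter_congr (fun v (_ : v ∈ PySem.List.pyRange
      (if c = [] then a + 1 else PySem.List.pyGetD c (-1) 0 + 1) (n + 1) 1) => by
    show (fun v => q v && (a :: c).all fun u => decide (Int.gcd u v = 1)) v
        = (fun v => (q v && decide (Int.gcd a v = 1)) && c.all fun u => decide (Int.gcd u v = 1)) v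
    simp only [List.all_cons]
    rw [← Bool.and_assoc])]
  apply List.map_congr_left
  intro v _
  simp

lemma extBax_ne_nil (n a a' : Int) (q : Int → Bool) (c : List Int) (h : c ≠ []) :
    extBax n a q c = extBax n a' q c := by
  unfold extBax
  rw [if_neg h, if_neg h]

lemma predSplit (a : Int) (q : Int → Bool) (hqa : q a = true) (c : List Int) :
    ((fun c => c.all q && pwB c) ∘ fun c => a :: c) c
      = (fun c => c.all (fun v => q v && decide (Int.gcd a v = 1)) && pwB c) c := by
  simp only [Function.comp_apply, List.all_cons, hqa, Bool.true_and, pwB_cons, all_and]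
  rw [← Bool.and_assoc]

lemma Hstep (n : Int) : ∀ (t : Nat) (a : Int), (n + 1 - a).toNat ≤ t →
    ∀ (q : Int → Bool) (r : Nat),
    ((PySem.List.combinations (PySem.List.pyRange a (n + 1) 1) r).filter
        (fun c => c.all q && pwB c)).flatMap (extBax n a q)
      = (PySem.List.combinations (PySem.List.pyRange a (n + 1) 1) (r + 1)).filter
          (fun c => c.all q && pwB c) := by
  intro t
  induction t with
  | zero =>
    intro a ha q r
    have hnil : PySem.List.pyRange a (n + 1) 1 = [] :=
      PySem.List.pyRange_one_eq_nil (by omega)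
    rw [hnil]
    cases r with
    | zero =>
      rw [PySem.List.combinations_zero, PySem.List.combinations_nil_succ]
      simp [pwB_nil, extBax, PySem.List.pyRange_one_eq_nil (show n + 1 ≤ a by omega)]
    | succ r =>
      rw [PySem.List.combinations_nil_succ, PySem.List.combinations_nil_succ]
      simp
  | succ t ih =>
    intro a ha q r
    cases r with
    | zero =>
      have hfl : (([[]] : List (List Int)).filter (fun c => c.all q && pwB c)) = [[]] := by
        simp [pwB_nil]
      rw [PySem.List.combinations_zero, hfl]
      have hflat : ([[]] : List (List Int)).flatMap (extBax n a q) = extBax n a q [] := by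
        simp
      rw [hflat]
      simp only [Nat.zero_add]
      rw [PySem.List.combinations_one, List.filter_map]
      unfold extBax
      rw [if_pos rfl]
      rw [List.filter_congr (fun v (_ : v ∈ PySem.List.pyRange a (n + 1) 1) => by
        show (fun v => q v && ([] : List Int).all fun u => decide (Int.gcd u v = 1)) v
            = ((fun c => c.all q && pwB c) ∘ fun v => [v]) v
        simp [pwB_singleton])]
      apply List.map_congr_left
      intro v _
      simp
    | succ r =>
      by_cases han : n < a
      · rw [PySem.List.pyRange_one_eq_nil (by omega), PySem.List.combinations_nil_succ,
          PySem.List.combinations_nil_succ]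
        simp
      · have hcons : PySem.List.pyRange a (n + 1) 1
            = a :: PySem.List.pyRange (a + 1) (n + 1) 1 :=
          PySem.List.pyRange_one_cons (by omega)
        rw [hcons, PySem.List.combinations_cons_succ, PySem.List.combinations_cons_succ,
          List.filter_append, List.filter_append, List.flatMap_append]
        congr 1
        · -- combinations that take the head a
          by_cases hqa : q a = true
          · rw [List.filter_map, List.filter_map, flatMap_map_comp]
            rw [flatMap_congr_mem _ _ _ (fun c (_ : c ∈ List.filter _
                (PySem.List.combinations (PySem.List.pyRange (a + 1) (n + 1) 1) r)) =>
              extBax_cons n a q c)]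
            rw [← List.map_flatMap]
            rw [List.filter_congr (fun c (_ : c ∈ PySem.List.combinations
                (PySem.List.pyRange (a + 1) (n + 1) 1) r) => predSplit a q hqa c),
              List.filter_congr (fun c (_ : c ∈ PySem.List.combinations
                (PySem.List.pyRange (a + 1) (n + 1) 1) (r + 1)) => predSplit a q hqa c)]
            exact congrArg _ (ih (a + 1) (by omega)
              (fun v => q v && decide (Int.gcd a v = 1)) r)
          · have hqa' : q a = false := by revert hqa; cases q a <;> simp
            rw [List.filter_map, List.filter_map]
            have hnil : ∀ (X : List (List Int)),
                X.filter ((fun c => c.all q && pwB c) ∘ fun c => a :: c) = [] := fun X =>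
              List.filter_eq_nil_iff.mpr (fun c _ => by
                simp [List.all_cons, hqa'])
            rw [hnil, hnil]
            simp
        · -- combinations that skip the head a
          rw [flatMap_congr_mem _ _ _ (fun c hc => extBax_ne_nil n a (a + 1) q c (by
            have hl := PySem.List.length_of_mem_combinations (List.mem_of_mem_filter hc)
            exact List.length_pos_iff.mp (by omega)))]
          exact ih (a + 1) (by omega) q (r + 1)

-- the candidate list carried by B's level entries, as a function of the clique
def candL (n : Int) (c : List Int) : List Int :=
  (PySem.List.pyRange 1 (n + 1) 1).filter
    (fun w => c.all (fun u => decide (u < w) && decide (Int.gcd u w = 1)))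

-- B's viability test: the clique can still possibly reach size k
def viaB (n k : Int) (c : List Int) : Bool :=
  decide (k ≤ ((candL n c).length : Int) + (c.length : Int))

-- level-entry decoration
def FF (n : Int) (c : List Int) : List Int × List Int := (c, candL n c)

-- the pairwise-coprime m-combinations, and their viable sublist
def Wcomb (n : Int) (m : Nat) : List (List Int) :=
  (PySem.List.combinations (PySem.List.pyRange 1 (n + 1) 1) m).filter pwB

def VCl (n k : Int) (m : Nat) : List (List Int) := (Wcomb n m).filter (viaB n k)

lemma candL_nil (n : Int) : candL n [] = PySem.List.pyRange 1 (n + 1) 1 := by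
  simp [candL]

lemma candL_append (n : Int) (xs ys : List Int) :
    candL n (xs ++ ys) = (candL n xs).filter
      (fun w => ys.all (fun u => decide (u < w) && decide (Int.gcd u w = 1))) := by
  unfold candL
  rw [List.filter_filter]
  apply List.filter_congr
  intro w _
  apply bool_ext
  simp only [List.all_append, Bool.and_eq_true]
  tauto

lemma pyGetD_neg_one_getLast (c : List Int) (h : c ≠ []) :
    PySem.List.pyGetD c (-1) 0 = (c.getLast?).getD 0 := by
  induction c with
  | nil => exact absurd rfl h
  | cons x c ih =>
    cases c with
    | nil => simp [pyGetD_neg_one_singleton]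
    | cons y ys =>
      rw [pyGetD_neg_one_cons x (y :: ys) (List.cons_ne_nil y ys), List.getLast?_cons_cons]
      exact ih (List.cons_ne_nil y ys)

lemma sorted_le_getLast (c : List Int) (hs : c.Pairwise (· < ·)) :
    ∀ x ∈ c, x ≤ (c.getLast?).getD 0 := by
  induction c with
  | nil => intro x hx; cases hx
  | cons a c ih =>
    intro x hx
    cases c with
    | nil =>
      rw [List.mem_singleton] at hx
      subst hx
      simp
    | cons b c' =>
      rw [List.getLast?_cons_cons]
      rcases List.mem_cons.mp hx with rfl | hx'
      · have hab : x < b := (List.pairwise_cons.mp hs).1 b (List.mem_cons_self ..)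
        have hb := ih (List.pairwise_cons.mp hs).2 b (List.mem_cons_self ..)
        omega
      · exact ih (List.pairwise_cons.mp hs).2 x hx'

lemma candL_eq_ext (n : Int) (c : List Int) (hs : c.Pairwise (· < ·))
    (hb : ∀ u ∈ c, 1 ≤ u ∧ u ≤ n) :
    candL n c
      = (PySem.List.pyRange (if c = [] then 1 else PySem.List.pyGetD c (-1) 0 + 1)
            (n + 1) 1).filter
          (fun v => true && c.all (fun u => decide (Int.gcd u v = 1))) := by
  by_cases hc : c = []
  · subst hc
    rw [if_pos rfl, candL_nil]
    exact (List.filter_eq_self.mpr (fun a _ => by simp)).symm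
  · rw [if_neg hc, pyGetD_neg_one_getLast c hc]
    obtain ⟨x, hx⟩ : ∃ x, c.getLast? = some x := by
      cases hgl : c.getLast? with
      | none => exact absurd (List.getLast?_eq_none_iff.mp hgl) hc
      | some x => exact ⟨x, rfl⟩
    have hLmem : (c.getLast?).getD 0 ∈ c := by
      rw [hx]
      exact List.mem_of_getLast? hx
    have hLb := hb _ hLmem
    have hsplit : PySem.List.pyRange 1 (n + 1) 1
        = PySem.List.pyRange 1 ((c.getLast?).getD 0 + 1) 1
          ++ PySem.List.pyRange ((c.getLast?).getD 0 + 1) (n + 1) 1 :=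
      PySem.List.pyRange_one_append 1 ((c.getLast?).getD 0 + 1) (n + 1) (by omega) (by omega)
    unfold candL
    rw [hsplit, List.filter_append]
    have h1 : (PySem.List.pyRange 1 ((c.getLast?).getD 0 + 1) 1).filter
        (fun w => c.all fun u => decide (u < w) && decide (Int.gcd u w = 1)) = [] := by
      apply List.filter_eq_nil_iff.mpr
      intro w hw
      rw [PySem.List.mem_pyRange_one] at hw
      simp only [List.all_eq_true, Bool.and_eq_true, decide_eq_true_eq]
      intro hall
      have := (hall _ hLmem).1
      omega
    rw [h1, List.nil_append]
    apply List.filter_congr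
    intro w hw
    rw [PySem.List.mem_pyRange_one] at hw
    apply bool_ext
    simp only [List.all_eq_true, Bool.and_eq_true, decide_eq_true_eq, Bool.true_and]
    constructor
    · intro hall; exact fun u hu => (hall u hu).2
    · intro hcop u hu
      exact ⟨by have := sorted_le_getLast c hs u hu; omega, hcop u hu⟩

lemma extBax_eq_candL (n : Int) (c : List Int) (hs : c.Pairwise (· < ·))
    (hb : ∀ u ∈ c, 1 ≤ u ∧ u ≤ n) :
    extBax n 1 (fun _ => true) c = (candL n c).map (fun v => c ++ [v]) := by
  unfold extBax
  rw [candL_eq_ext n c hs hb]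

lemma flatMap_ite_singleton {α : Type} (l : List Int) (p : Int → Prop) [DecidablePred p]
    (f : Int → α) :
    (l.flatMap (fun v => if p v then [f v] else [])) = (l.filter (fun v => decide (p v))).map f := by
  induction l with
  | nil => rfl
  | cons x xs ih =>
    by_cases hx : p x
    · rw [List.flatMap_cons, if_pos hx, ih, List.filter_cons_of_pos (by simp [hx]),
        List.map_cons, List.singleton_append]
    · rw [List.flatMap_cons, if_neg hx, ih, List.filter_cons_of_neg (by simp [hx]),
        List.nil_append]

lemma flatMap_filter_support {α β : Type} (l : List α) (p : α → Bool) (f : α → List β)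
    (h : ∀ x ∈ l, p x = false → f x = []) :
    (l.filter p).flatMap f = l.flatMap f := by
  induction l with
  | nil => rfl
  | cons x xs ih =>
    by_cases hx : p x = true
    · rw [List.filter_cons_of_pos hx, List.flatMap_cons, List.flatMap_cons,
        ih (fun y hy hpy => h y (List.mem_cons_of_mem _ hy) hpy)]
    · have hx' : p x = false := by revert hx; cases p x <;> simp
      rw [List.filter_cons_of_neg (by simp [hx']), List.flatMap_cons,
        h x (List.mem_cons_self ..) hx', List.nil_append,
        ih (fun y hy hpy => h y (List.mem_cons_of_mem _ hy) hpy)]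

lemma sublist_filter_of_all {l r : List Int} (p : Int → Bool) (hsub : l.Sublist r)
    (hall : ∀ x ∈ l, p x = true) : l.Sublist (r.filter p) := by
  have h1 : l.filter p = l := List.filter_eq_self.mpr hall
  rw [← h1]
  exact List.Sublist.filter p hsub

lemma rem_eq_candL (n : Int) (c : List Int) (v : Int) :
    (candL n c).filter (fun w => decide (v < w) && decide (Int.gcd v w = 1))
      = candL n (c ++ [v]) := by
  rw [candL_append n c [v]]
  apply List.filter_congr
  intro w _
  apply bool_ext
  simp

lemma step_main (n k : Int) (Y : List (List Int))
    (hY : ∀ c ∈ Y, c.Pairwise (· < ·) ∧ (∀ u ∈ c, 1 ≤ u ∧ u ≤ n)) :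
    stepB k (Y.map (FF n))
      = ((Y.flatMap (extBax n 1 (fun _ => true))).filter (viaB n k)).map (FF n) := by
  unfold stepB
  rw [flatMap_map_comp]
  have hnode : ∀ c ∈ Y,
      ((FF n c).2.flatMap (fun v =>
        let rem := (FF n c).2.filter (fun w => decide (v < w) && decide (Int.gcd v w = 1))
        if (rem.length : Int) ≥ k - ((FF n c).1.length : Int) - 1
        then [((FF n c).1 ++ [v], rem)] else []))
      = ((extBax n 1 (fun _ => true) c).filter (viaB n k)).map (FF n) := by
    intro c hc
    obtain ⟨hs, hb⟩ := hY c hc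
    show (candL n c).flatMap (fun v =>
        if ((((candL n c).filter (fun w => decide (v < w) && decide (Int.gcd v w = 1))).length : Int)
            ≥ k - (c.length : Int) - 1)
        then [(c ++ [v], (candL n c).filter (fun w => decide (v < w) && decide (Int.gcd v w = 1)))]
        else []) = _
    rw [flatMap_ite_singleton (candL n c)
      (fun v => (((candL n c).filter (fun w => decide (v < w) && decide (Int.gcd v w = 1))).length : Int)
        ≥ k - (c.length : Int) - 1)
      (fun v => (c ++ [v], (candL n c).filter (fun w => decide (v < w) && decide (Int.gcd v w = 1))))]
    rw [extBax_eq_candL n c hs hb, List.filter_map, List.map_map]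
    rw [List.filter_congr (fun v (_ : v ∈ candL n c) => by
      show decide ((((candL n c).filter (fun w => decide (v < w) && decide (Int.gcd v w = 1))).length : Int)
          ≥ k - (c.length : Int) - 1) = ((viaB n k) ∘ (fun v => c ++ [v])) v
      rw [Function.comp_apply]
      unfold viaB
      rw [rem_eq_candL n c v]
      rw [decide_eq_decide]
      rw [List.length_append]
      simp only [List.length_singleton]
      push_cast
      omega)]
    apply List.map_congr_left
    intro v _
    show (c ++ [v], (candL n c).filter (fun w => decide (v < w) && decide (Int.gcd v w = 1)))
        = (FF n ∘ fun v => c ++ [v]) v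
    rw [Function.comp_apply]
    unfold FF
    rw [rem_eq_candL n c v]
  rw [flatMap_congr_mem _ _ _ hnode, ← List.map_flatMap, ← List.filter_flatMap]

lemma drop_nonviable (n k : Int) (c : List Int) (hs : c.Pairwise (· < ·))
    (hb : ∀ u ∈ c, 1 ≤ u ∧ u ≤ n) (hnv : viaB n k c = false) :
    (extBax n 1 (fun _ => true) c).filter (viaB n k) = [] := by
  rw [extBax_eq_candL n c hs hb, List.filter_map]
  have hfl : (candL n c).filter ((viaB n k) ∘ (fun v => c ++ [v])) = [] := by
    apply List.filter_eq_nil_iff.mpr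
    intro v hv
    have hlt : (candL n (c ++ [v])).length < (candL n c).length := by
      rw [← rem_eq_candL n c v]
      have h0 : 0 < ((candL n c).filter
          (fun a => !(decide (v < a) && decide (Int.gcd v a = 1)))).length :=
        List.length_pos_of_mem (List.mem_filter.mpr ⟨hv, by simp⟩)
      have hsp := (List.length_eq_length_filter_add (l := candL n c)
        (f := fun w => decide (v < w) && decide (Int.gcd v w = 1)))
      omega
    have hnv' : ¬ (k ≤ ((candL n c).length : Int) + (c.length : Int)) := by
      simpa [viaB, decide_eq_false_iff_not] using hnv
    simp only [Function.comp_apply, viaB, decide_eq_true_eq, List.length_append,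
      List.length_singleton]
    push_cast
    omega
  rw [hfl]
  rfl

lemma mem_Wcomb_facts (n : Int) (m : Nat) (c : List Int) (hc : c ∈ Wcomb n m) :
    c.Pairwise (· < ·) ∧ (∀ u ∈ c, 1 ≤ u ∧ u ≤ n) ∧ c.length = m ∧ pwB c = true := by
  have hsub := PySem.List.sublist_of_mem_combinations (List.mem_of_mem_filter hc)
  refine ⟨List.Pairwise.sublist hsub (PySem.List.pairwise_lt_pyRange_one 1 (n + 1)),
    fun u hu => ?_, PySem.List.length_of_mem_combinations (List.mem_of_mem_filter hc),
    List.of_mem_filter hc⟩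
  have := hsub.subset hu
  rw [PySem.List.mem_pyRange_one] at this
  omega

lemma VCl_empty_mono (n k : Int) (m t : Nat) (h : VCl n k m = []) :
    VCl n k (m + t) = [] := by
  unfold VCl at h ⊢
  rw [List.filter_eq_nil_iff] at h ⊢
  intro c hc hvia
  obtain ⟨hsort, hbnd, hlen, hpw⟩ := mem_Wcomb_facts n (m + t) c hc
  -- the m-prefix of c is a viable pairwise-coprime m-combination
  have hTmem : c.take m ∈ Wcomb n m := by
    unfold Wcomb
    apply List.mem_filter.mpr
    constructor
    · rw [PySem.List.mem_combinations_iff]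
      exact ⟨(List.take_sublist _ _).trans
        (PySem.List.sublist_of_mem_combinations (List.mem_of_mem_filter hc)),
        by rw [List.length_take, hlen]; omega⟩
    · simp only [pwB, decide_eq_true_eq] at hpw ⊢
      exact hpw.sublist (List.take_sublist _ _)
  apply h (c.take m) hTmem
  -- viability of the prefix
  cases t with
  | zero =>
    rw [List.take_of_length_le (by omega)]
    exact hvia
  | succ s =>
    have hTD := List.take_append_drop m c
    have hDne : c.drop m ≠ [] :=
      List.length_pos_iff.mp (by rw [List.length_drop, hlen]; omega)
    obtain ⟨x, hx⟩ : ∃ x, (c.drop m).getLast? = some x := by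
      cases hgl : (c.drop m).getLast? with
      | none => exact absurd (List.getLast?_eq_none_iff.mp hgl) hDne
      | some x => exact ⟨x, rfl⟩
    have hxD : x ∈ c.drop m := List.mem_of_getLast? hx
    have hxc : x ∈ c := (List.drop_sublist m c).subset hxD
    -- the split facts between prefix and suffix
    have hpairTD : ∀ u ∈ c.take m, ∀ w ∈ c.drop m, u < w := by
      have := List.pairwise_append.mp (hTD ▸ hsort)
      exact this.2.2
    have hcopTD : ∀ u ∈ c.take m, ∀ w ∈ c.drop m, Int.gcd u w = 1 := by
      simp only [pwB, decide_eq_true_eq] at hpw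
      have := List.pairwise_append.mp (hTD ▸ hpw)
      exact this.2.2
    have hDsorted : (c.drop m).Pairwise (· < ·) :=
      List.Pairwise.sublist (List.drop_sublist m c) hsort
    have hD_le_x : ∀ w ∈ c.drop m, w ≤ x := by
      intro w hw
      have := sorted_le_getLast (c.drop m) hDsorted w hw
      rw [hx] at this
      exact this
    -- part 1: the suffix embeds into the prefix candidates with values ≤ x
    have hDsubcand : (c.drop m).Sublist (candL n (c.take m)) := by
      apply sublist_filter_of_all
      · exact (List.drop_sublist m c).trans
          (PySem.List.sublist_of_mem_combinations (List.mem_of_mem_filter hc))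
      · intro w hw
        simp only [List.all_eq_true, Bool.and_eq_true, decide_eq_true_eq]
        intro u hu
        exact ⟨hpairTD u hu w hw, hcopTD u hu w hw⟩
    have h1 : (c.drop m).Sublist ((candL n (c.take m)).filter (fun w => !(decide (x < w)))) := by
      apply sublist_filter_of_all _ hDsubcand
      intro w hw
      have := hD_le_x w hw
      simp
      omega
    -- part 2: the full candidates embed into the prefix candidates with values > x
    have hcandsub : (candL n c).Sublist ((candL n (c.take m)).filter (fun w => decide (x < w))) := by
      have hrepr : candL n c = (candL n (c.take m)).filter
          (fun w => (c.drop m).all (fun u => decide (u < w) && decide (Int.gcd u w = 1))) := by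
        conv_lhs => rw [← hTD]
        exact candL_append n (c.take m) (c.drop m)
      apply sublist_filter_of_all
      · rw [hrepr]; exact List.filter_sublist
      · intro w hw
        rw [hrepr] at hw
        have := List.of_mem_filter hw
        rw [List.all_eq_true] at this
        have hxw := this x hxD
        simp only [Bool.and_eq_true, decide_eq_true_eq] at hxw
        simp [hxw.1]
    -- combine the counts
    have hsplitlen := List.length_eq_length_filter_add
      (l := candL n (c.take m)) (f := fun w => decide (x < w))
    have hlen1 := h1.length_le
    have hlen2 := hcandsub.length_le
    have hlenD : (c.drop m).length = s + 1 := by rw [List.length_drop, hlen]; omega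
    have hlenT : (c.take m).length = m := by rw [List.length_take, hlen]; omega
    simp only [viaB, decide_eq_true_eq] at hvia ⊢
    rw [hlenT]
    rw [hlen] at hvia
    push_cast at hvia ⊢
    omega

lemma loopB_inv (n k : Int) : ∀ (t m : Nat),
    loopB k t ((VCl n k m).map (FF n)) = (VCl n k (m + t)).map (FF n) := by
  intro t
  induction t with
  | zero => intro m; simp [loopB]
  | succ t ih =>
    intro m
    rw [loopB]
    by_cases hE : VCl n k m = []
    · rw [hE, VCl_empty_mono n k m (t + 1) hE]
      simp
    · rw [if_neg (by simpa [List.map_eq_nil_iff] using hE)]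
      have hfacts : ∀ c ∈ VCl n k m, c.Pairwise (· < ·) ∧ (∀ u ∈ c, 1 ≤ u ∧ u ≤ n) := by
        intro c hc
        obtain ⟨h1, h2, _, _⟩ := mem_Wcomb_facts n m c (List.mem_of_mem_filter hc)
        exact ⟨h1, h2⟩
      rw [step_main n k (VCl n k m) hfacts]
      have hflat : ((VCl n k m).flatMap (extBax n 1 (fun _ => true))).filter (viaB n k)
          = VCl n k (m + 1) := by
        rw [List.filter_flatMap]
        unfold VCl
        rw [flatMap_filter_support (Wcomb n m) (viaB n k)
          (fun c => (extBax n 1 (fun _ => true) c).filter (viaB n k))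
          (fun c hc hnv => by
            obtain ⟨h1, h2, _, _⟩ := mem_Wcomb_facts n m c hc
            exact drop_nonviable n k c h1 h2 hnv)]
        rw [← List.filter_flatMap]
        have hq : ∀ (j : Nat), Wcomb n j
            = (PySem.List.combinations (PySem.List.pyRange 1 (n + 1) 1) j).filter
                (fun c => c.all (fun _ => true) && pwB c) := by
          intro j
          unfold Wcomb
          apply List.filter_congr
          intro c _
          simp
        rw [hq m, Hstep n (n + 1 - 1).toNat 1 (by omega) (fun _ => true) m, ← hq (m + 1)]
      rw [hflat, ih (m + 1), show m + 1 + t = m + (t + 1) from by omega]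

lemma alt_char (n k : Int) (hk : 1 ≤ k) :
    find_coprime_cliques_alt n k
      = (PySem.List.combinations (PySem.List.pyRange 1 (n + 1) 1) k.toNat).filter pwB := by
  unfold find_coprime_cliques_alt
  rw [if_neg (by omega)]
  obtain ⟨s, hsk⟩ : ∃ s, k.toNat = s + 1 := ⟨k.toNat - 1, by omega⟩
  rw [hsk, loopB]
  rw [if_neg (by simp)]
  have hL0 : ([(([] : List Int), PySem.List.pyRange 1 (n + 1) 1)])
      = ([([] : List Int)]).map (FF n) := by
    simp [FF, candL_nil]
  rw [hL0]
  rw [step_main n k [[]] (by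
    intro c hc
    rw [List.mem_singleton] at hc
    subst hc
    exact ⟨List.Pairwise.nil, by simp⟩)]
  have h1 : ([([] : List Int)]).flatMap (extBax n 1 (fun _ => true))
      = ((PySem.List.combinations (PySem.List.pyRange 1 (n + 1) 1) 0).filter
          (fun c => c.all (fun _ => true) && pwB c)).flatMap (extBax n 1 (fun _ => true)) := by
    rw [PySem.List.combinations_zero]
    simp [pwB_nil]
  rw [h1, Hstep n (n + 1 - 1).toNat 1 (by omega) (fun _ => true) 0]
  have h2 : (PySem.List.combinations (PySem.List.pyRange 1 (n + 1) 1) (0 + 1)).filter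
      (fun c => c.all (fun _ => true) && pwB c) = Wcomb n 1 := by
    rw [Nat.zero_add]
    unfold Wcomb
    apply List.filter_congr
    intro c _
    simp
  rw [h2]
  show (loopB k s ((VCl n k 1).map (FF n))).map (fun p => p.1) = _
  rw [loopB_inv n k s 1, List.map_map]
  rw [show (1 + s) = k.toNat from by omega]
  rw [show ((fun p : List Int × List Int => p.1) ∘ FF n) = id from rfl, List.map_id]
  unfold VCl
  have hself : (Wcomb n k.toNat).filter (viaB n k) = Wcomb n k.toNat := by
    apply List.filter_eq_self.mpr
    intro c hc
    obtain ⟨_, _, hlen, _⟩ := mem_Wcomb_facts n k.toNat c hc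
    simp only [viaB, decide_eq_true_eq]
    rw [hlen]
    omega
  rw [hself]
  unfold Wcomb
  rw [hsk]

-- ===== VERDICT (by name: the statement is the Claim_ definition above) =====
theorem find_coprime_cliques_spec : Claim_equal_find_coprime_cliques := by
  unfold Claim_equal_find_coprime_cliques Spec_find_coprime_cliques
  intro n k _
  by_cases hk : k < 1
  · simp [find_coprime_cliques, find_coprime_cliques_alt, hk]
  · rw [a_char n k (by omega), alt_char n k (by omega)]
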